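-- pv_equiv track=rewrite | github.com/rasumovsky/PortfolioTracker | plotting.py | get_confidence_interval
-- ===== SOURCE A (Python) =====
-- def get_confidence_interval(values):
--     num_simulations = len(values)
--     # Find the median, 1, and 2 std dev values.
--     probs = [0.045, 0.317, 0.5, 0.683, 0.955]
--     indices = [int(prob * float(num_simulations)) for prob in probs]
--     lower_2s = []
--     lower_1s = []
--     median = []
--     upper_1s = []
--     upper_2s = []
--     for year in range(len(values[0])):
--         yearly_values = [values[sim][year] for sim in range(num_simulations)]
--         yearly_values.sort()
--         lower_2s.append(yearly_values[indices[0]])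
--         lower_1s.append(yearly_values[indices[1]])
--         median.append(yearly_values[indices[2]])
--         upper_1s.append(yearly_values[indices[3]])
--         upper_2s.append(yearly_values[indices[4]])
--     return lower_2s, lower_1s, median, upper_1s, upper_2s
-- ===== SOURCE B (Python) =====
-- def _select(a, k):
--     # k-th smallest (0-based) via 3-way quickselect; returns 0 if k >= len(a).
--     while a:
--         p = a[len(a) // 2]
--         lows = [x for x in a if x < p]
--         if k < len(lows):
--             a = lows
--             continue
--         cnt = a.count(p)
--         if k < len(lows) + cnt:
--             return p
--         k -= len(lows) + cnt
--         a = [x for x in a if x > p]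
--     return 0
--
--
-- def get_confidence_interval(values):
--     n = len(values)
--     indices = [int(prob * float(n)) for prob in (0.045, 0.317, 0.5, 0.683, 0.955)]
--     bands = ([], [], [], [], [])
--     for column in zip(*values):
--         column = list(column)
--         for band, k in zip(bands, indices):
--             band.append(_select(column, k))
--     return bands
-- ===== Notes on version B (the rewrite author's own statement) =====
-- stated objective: alternative
-- what changed: B replaces the per-year full sort (sort column, then read 5 fixed positions) by a 3-way quickselect that computes each of the 5 order statistics directly by recursive partitioning, iterating over columns obtained by transposition (zip) instead of indexed inner scans.
import Mathlib
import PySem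

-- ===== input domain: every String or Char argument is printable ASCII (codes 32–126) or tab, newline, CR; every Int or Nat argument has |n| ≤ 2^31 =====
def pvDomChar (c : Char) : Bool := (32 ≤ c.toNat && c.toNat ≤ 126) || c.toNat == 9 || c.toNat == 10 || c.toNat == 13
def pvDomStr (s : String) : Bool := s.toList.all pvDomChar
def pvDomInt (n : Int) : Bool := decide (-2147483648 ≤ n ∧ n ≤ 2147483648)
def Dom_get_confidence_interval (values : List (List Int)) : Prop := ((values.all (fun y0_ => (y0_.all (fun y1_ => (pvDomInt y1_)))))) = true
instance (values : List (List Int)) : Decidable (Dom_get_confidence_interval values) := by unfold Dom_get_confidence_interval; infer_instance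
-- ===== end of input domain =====

-- B replaces A's per-year full sort by a 3-way quickselect computing the 5 order
-- statistics directly, over columns obtained by transposition (objective: alternative
-- algorithm, similar cost). Equivalence is about the return value; neither side
-- mutates its argument.

-- ===== PORT A =====
-- Exact integer model of Python's float step `int(prob * float(n))`:
-- round n to a 53-bit double (nearest, ties to even), multiply exactly by the
-- dyadic rational that IS the double literal (e.g. 0.045 = 3242591731706757/2^56),
-- round the product to 53 bits again, truncate.  Exact for every n admitted by
-- Pre_ (below the OverflowError bound); both Pythons perform this same step.
def pvRnd53 (v : Nat) : Nat :=
  let b := PySem.Int.bitLength (v : Int)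
  if b ≤ 53 then v
  else
    let d := b - 53
    let q := v / 2 ^ d
    let r := v % 2 ^ d
    let half := 2 ^ (d - 1)
    if half < r ∨ (r = half ∧ q % 2 = 1) then (q + 1) * 2 ^ d else q * 2 ^ d

def pvFloatIdx (m s n : Nat) : Nat := pvRnd53 (m * pvRnd53 n) / 2 ^ s

-- `[int(prob * float(num_simulations)) for prob in probs]`, shared verbatim by both Pythons
def pvIndices (n : Nat) : List Nat :=
  [pvFloatIdx 3242591731706757 56 n, pvFloatIdx 5710564327505789 54 n,
   pvFloatIdx 1 1 n, pvFloatIdx 3075958545494049 52 n, pvFloatIdx 8601875288277647 53 n]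

def get_confidence_interval (values : List (List Int)) : List Int × List Int × List Int × List Int × List Int :=
  let n := values.length
  let indices := pvIndices n
  (PySem.List.pyRange 0 ((PySem.List.pyGetD values 0 []).length : Int) 1).foldl
    (fun s year =>
      let yearly := (PySem.List.pyRange 0 (n : Int) 1).map
        (fun sim => PySem.List.pyGetD (PySem.List.pyGetD values sim []) year 0)
      let ys := PySem.List.sorted yearly (fun x => x) false
      (s.1 ++ [PySem.List.pyGetD ys ((indices.getD 0 0 : Nat) : Int) 0],
       s.2.1 ++ [PySem.List.pyGetD ys ((indices.getD 1 0 : Nat) : Int) 0],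
       s.2.2.1 ++ [PySem.List.pyGetD ys ((indices.getD 2 0 : Nat) : Int) 0],
       s.2.2.2.1 ++ [PySem.List.pyGetD ys ((indices.getD 3 0 : Nat) : Int) 0],
       s.2.2.2.2 ++ [PySem.List.pyGetD ys ((indices.getD 4 0 : Nat) : Int) 0]))
    ([], [], [], [], [])

-- ===== PORT B =====
-- `_select(a, k)`: 3-way quickselect, pivot a[len(a)//2]
def pySelect (a : List Int) (k : Nat) : Int :=
  if _ha : a = [] then 0
  else
    let p := a.getD (a.length / 2) 0
    let lows := a.filter (fun x => decide (x < p))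
    if k < lows.length then pySelect lows k
    else
      let cnt := PySem.List.count a p
      if k < lows.length + cnt then p
      else pySelect (a.filter (fun x => decide (p < x))) (k - (lows.length + cnt))
termination_by a.length
decreasing_by
  · have hlt : a.length / 2 < a.length := Nat.div_lt_self (by cases a <;> simp_all) (by omega)
    have hp : a.getD (a.length / 2) 0 ∈ a := by
      rw [List.getD_eq_getElem a 0 hlt]; exact List.getElem_mem hlt
    simp only [List.length_unattach]
    exact Nat.lt_of_lt_of_le
      (List.length_filter_lt_length_iff_exists.mpr
        ⟨⟨a.getD (a.length / 2) 0, hp⟩, List.mem_attach _ _, by simp⟩)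
      (Nat.le_of_eq List.length_attach)
  · have hlt : a.length / 2 < a.length := Nat.div_lt_self (by cases a <;> simp_all) (by omega)
    have hp : a.getD (a.length / 2) 0 ∈ a := by
      rw [List.getD_eq_getElem a 0 hlt]; exact List.getElem_mem hlt
    simp only [List.length_unattach]
    exact Nat.lt_of_lt_of_le
      (List.length_filter_lt_length_iff_exists.mpr
        ⟨⟨a.getD (a.length / 2) 0, hp⟩, List.mem_attach _ _, by simp⟩)
      (Nat.le_of_eq List.length_attach)

-- `zip(*values)`: transpose truncated to the shortest row (Python builtin, ported by its semantics)
def pyZipStar (rows : List (List Int)) : List (List Int) :=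
  let m := ((rows.map List.length).min?).getD 0
  (List.range m).map (fun j => rows.map (fun r => r.getD j 0))

def get_confidence_interval_alt (values : List (List Int)) : List Int × List Int × List Int × List Int × List Int :=
  let indices := pvIndices values.length
  (pyZipStar values).foldl
    (fun s col =>
      (s.1 ++ [pySelect col (indices.getD 0 0)],
       s.2.1 ++ [pySelect col (indices.getD 1 0)],
       s.2.2.1 ++ [pySelect col (indices.getD 2 0)],
       s.2.2.2.1 ++ [pySelect col (indices.getD 3 0)],
       s.2.2.2.2 ++ [pySelect col (indices.getD 4 0)]))
    ([], [], [], [], [])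

-- ===== PRECONDITION & SPEC =====
-- A raises IndexError when values is empty or some row is shorter than the first
-- row (with the first row nonempty), and OverflowError when float(len(values))
-- exceeds the largest double; Pre_ excludes exactly those inputs.
def Pre_get_confidence_interval (values : List (List Int)) : Prop :=
  values ≠ [] ∧
  (values.all (fun r => (values.headD []).length ≤ r.length)) = true ∧
  values.length < 179769313486231580793728971405303415079934132710037826936173778980444968292764750946649017977587207096330286416692887910946555547851940402630657488671505820681908902000708383676273854845817711531764475730270069855571366959622842914819860834936475292719074168444365510704342711559699508093042880177904174497792
instance (values : List (List Int)) : Decidable (Pre_get_confidence_interval values) := by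
  unfold Pre_get_confidence_interval; infer_instance

def pvWitness_get_confidence_interval : List (List Int) := [[3, 1], [2, 4]]

def Spec_get_confidence_interval (values : List (List Int)) (out : List Int × List Int × List Int × List Int × List Int) : Prop := out = get_confidence_interval_alt values
instance (values : List (List Int)) (out : List Int × List Int × List Int × List Int × List Int) : Decidable (Spec_get_confidence_interval values out) := by unfold Spec_get_confidence_interval; infer_instance

-- ===== CLAIM (what is proved, stated in full; the proofs are below) =====
def Claim_equal_get_confidence_interval : Prop := ∀ (values : List (List Int)), Dom_get_confidence_interval values → Pre_get_confidence_interval values → Spec_get_confidence_interval values (get_confidence_interval values)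

-- ===== LEMMAS AND PROOFS =====

theorem pv_getD_append_left {α : Type} [Inhabited α] (l l' : List α) (n : Nat) (d : α)
    (h : n < l.length) : (l ++ l').getD n d = l.getD n d := by
  simp [List.getD, List.getElem?_append_left h]

theorem pv_getD_append_right {α : Type} [Inhabited α] (l l' : List α) (n : Nat) (d : α)
    (h : l.length ≤ n) : (l ++ l').getD n d = l'.getD (n - l.length) d := by
  simp [List.getD, List.getElem?_append_right h]

-- the five-band append loop is five maps
theorem pv_foldl5 {α : Type} (l : List α) (f1 f2 f3 f4 f5 : α → Int) (a b c d e : List Int) :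
    l.foldl (fun s y => (s.1 ++ [f1 y], s.2.1 ++ [f2 y], s.2.2.1 ++ [f3 y],
        s.2.2.2.1 ++ [f4 y], s.2.2.2.2 ++ [f5 y])) (a, b, c, d, e)
    = (a ++ l.map f1, b ++ l.map f2, c ++ l.map f3, d ++ l.map f4, e ++ l.map f5) := by
  induction l generalizing a b c d e with
  | nil => simp
  | cons x t ih => simp [ih]

theorem pv_map_range_getD (values : List (List Int)) (g : List Int → Int) :
    (List.range values.length).map (fun i => g (values.getD i [])) = values.map g := by
  refine List.ext_getElem (by simp) ?_
  intro i h1 h2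
  simp only [List.getElem_map, List.getElem_range]
  rw [List.getD_eq_getElem values [] (by simpa using h2)]

theorem pv_map_range_getD_col (values : List (List Int)) (j : Nat) :
    (List.range values.length).map (fun i => (values.getD i []).getD j 0)
      = values.map (fun r => r.getD j 0) :=
  pv_map_range_getD values (fun r => r.getD j 0)

-- sorting splits at any pivot into sorted lows, the pivot's copies, sorted highs
theorem pv_sorted_split (a : List Int) (p : Int) :
    PySem.List.sorted a (fun x => x) false
    = PySem.List.sorted (a.filter (fun x => decide (x < p))) (fun x => x) false
      ++ List.replicate (a.count p) p
      ++ PySem.List.sorted (a.filter (fun x => decide (p < x))) (fun x => x) false := by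
  have hE : a.filter (fun x => x == p) = List.replicate (a.count p) p := List.filter_beq p
  have e1 : (a.filter (fun x => !decide (x < p))).filter (fun x => x == p)
      = a.filter (fun x => x == p) := by
    rw [List.filter_filter]
    apply List.filter_congr
    intro x _
    by_cases h : x = p <;> simp [h]
  have e2 : (a.filter (fun x => !decide (x < p))).filter (fun x => !(x == p))
      = a.filter (fun x => decide (p < x)) := by
    rw [List.filter_filter]
    apply List.filter_congr
    intro x _
    apply Bool.eq_iff_iff.mpr
    simp only [Bool.and_eq_true, Bool.not_eq_true', decide_eq_false_iff_not, beq_eq_false_iff_ne,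
      ne_eq, decide_eq_true_eq]
    omega
  apply PySem.List.sorted_id_eq_of_perm_of_pairwise
  · -- permutation with a
    have hperm1 : (a.filter (fun x => decide (x < p)) ++ a.filter (fun x => !decide (x < p))).Perm a :=
      List.filter_append_perm _ a
    have hperm2 : ((a.filter (fun x => !decide (x < p))).filter (fun x => x == p)
        ++ (a.filter (fun x => !decide (x < p))).filter (fun x => !(x == p))).Perm
        (a.filter (fun x => !decide (x < p))) := List.filter_append_perm _ _
    rw [e1, e2, hE] at hperm2
    have hfirst : ((PySem.List.sorted (a.filter (fun x => decide (x < p))) (fun x => x) false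
            ++ List.replicate (a.count p) p)
            ++ PySem.List.sorted (a.filter (fun x => decide (p < x))) (fun x => x) false).Perm
        (a.filter (fun x => decide (x < p))
            ++ (List.replicate (a.count p) p ++ a.filter (fun x => decide (p < x)))) := by
      rw [List.append_assoc]
      exact (PySem.List.sorted_perm _ _ _).append
        ((List.Perm.refl _).append (PySem.List.sorted_perm _ _ _))
    exact hfirst.trans ((List.Perm.append_left _ hperm2).trans hperm1)
  · -- pairwise ≤
    have memL : ∀ x ∈ PySem.List.sorted (a.filter (fun x => decide (x < p))) (fun x => x) false,
        x < p := by
      intro x hx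
      have := (PySem.List.mem_sorted _ _ _ _).mp hx
      simpa using (List.mem_filter.mp this).2
    have memH : ∀ x ∈ PySem.List.sorted (a.filter (fun x => decide (p < x))) (fun x => x) false,
        p < x := by
      intro x hx
      have := (PySem.List.mem_sorted _ _ _ _).mp hx
      simpa using (List.mem_filter.mp this).2
    rw [List.append_assoc]
    apply List.pairwise_append.mpr
    refine ⟨by simpa using PySem.List.sorted_pairwise _ _, ?_, ?_⟩
    · apply List.pairwise_append.mpr
      refine ⟨List.pairwise_replicate.mpr (Or.inr le_rfl), by simpa using PySem.List.sorted_pairwise _ _, ?_⟩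
      intro x hx y hy
      rw [List.eq_of_mem_replicate hx]
      exact le_of_lt (memH y hy)
    · intro x hx y hy
      rcases List.mem_append.mp hy with hy | hy
      · rw [List.eq_of_mem_replicate hy]
        exact le_of_lt (memL x hx)
      · exact le_of_lt (lt_trans (memL x hx) (memH y hy))

theorem pv_select_eq_sorted (a : List Int) (k : Nat) :
    pySelect a k = (PySem.List.sorted a (fun x => x) false).getD k 0 := by
  suffices H : ∀ (n : Nat) (a : List Int) (k : Nat), a.length ≤ n →
      pySelect a k = (PySem.List.sorted a (fun x => x) false).getD k 0 from
    H a.length a k le_rfl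
  intro n
  induction n with
  | zero =>
    intro a k hlen
    have ha : a = [] := List.eq_nil_of_length_eq_zero (by omega)
    subst ha
    rw [pySelect]
    simp [show PySem.List.sorted ([] : List Int) (fun x => x) false = [] from rfl]
  | succ n ih =>
    intro a k hlen
    by_cases ha : a = []
    · subst ha
      rw [pySelect]
      simp [show PySem.List.sorted ([] : List Int) (fun x => x) false = [] from rfl]
    · rw [pySelect]
      simp only [dif_neg ha]
      set p := a.getD (a.length / 2) 0 with hp
      have hpmem : p ∈ a := by
        have hlt : a.length / 2 < a.length := Nat.div_lt_self (by cases a <;> simp_all) (by omega)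
        rw [hp, List.getD_eq_getElem a 0 hlt]
        exact List.getElem_mem hlt
      have hLlen : (a.filter (fun x => decide (x < p))).length < a.length :=
        List.length_filter_lt_length_iff_exists.mpr ⟨p, hpmem, by simp⟩
      have hHlen : (a.filter (fun x => decide (p < x))).length < a.length :=
        List.length_filter_lt_length_iff_exists.mpr ⟨p, hpmem, by simp⟩
      have hcnt : PySem.List.count a p = a.count p := PySem.List.count_eq a p
      rw [pv_sorted_split a p, List.append_assoc]
      split_ifs with h1 h2
      · rw [pv_getD_append_left _ _ _ _ (by rw [PySem.List.length_sorted]; exact h1)]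
        exact ih _ k (by omega)
      · rw [pv_getD_append_right _ _ _ _ (by rw [PySem.List.length_sorted]; omega),
          pv_getD_append_left _ _ _ _ (by simp [PySem.List.length_sorted]; omega)]
        rw [PySem.List.length_sorted]
        simp only [List.getD, List.getElem?_replicate]
        rw [if_pos (by omega)]
        rfl
      · rw [pv_getD_append_right _ _ _ _ (by rw [PySem.List.length_sorted]; omega),
          pv_getD_append_right _ _ _ _ (by simp [PySem.List.length_sorted]; omega)]
        rw [ih _ _ (by omega)]
        congr 1
        simp [PySem.List.length_sorted]
        omega

-- ===== VERDICT (by name: the statement is the Claim_ definition above) =====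
theorem get_confidence_interval_spec : Claim_equal_get_confidence_interval := by
  intro values hdom hpre
  obtain ⟨hne, hall, -⟩ := hpre
  obtain ⟨v0, rest, rfl⟩ : ∃ v0 rest, values = v0 :: rest := by
    cases values with
    | nil => exact absurd rfl hne
    | cons h t => exact ⟨h, t, rfl⟩
  have hall' : ∀ r ∈ v0 :: rest, v0.length ≤ r.length := by
    intro r hr
    simpa using List.all_eq_true.mp hall r hr
  have hmin : ((v0 :: rest).map List.length).min? = some v0.length := by
    rw [List.min?_eq_some_iff]
    exact ⟨by simp, by intro b hb; obtain ⟨r, hr, rfl⟩ := List.mem_map.mp hb; exact hall' r hr⟩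
  unfold Spec_get_confidence_interval get_confidence_interval get_confidence_interval_alt pyZipStar
  simp only [hmin, Option.getD_some, PySem.List.pyGetD_zero_cons, PySem.List.pyRange_one,
    Int.sub_zero, Int.toNat_natCast, List.foldl_map, zero_add, PySem.List.pyGetD_natCast]
  rw [pv_foldl5, pv_foldl5]
  simp only [List.nil_append, Prod.mk.injEq]
  refine ⟨?_, ?_, ?_, ?_, ?_⟩ <;>
  · refine List.map_congr_left fun j hj => ?_
    rw [List.map_map]
    simp only [Function.comp_def, PySem.List.pyGetD_natCast]
    rw [pv_map_range_getD_col, pv_select_eq_sorted]
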